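-- pv_equiv track=rewrite | github.com/rudramenon98/tlp-python | packages/ai_doc_parser/src/ai_doc_parser/training/label_extractors/latex_arvix_extractor.py | _remove_section_commands
-- ===== SOURCE A (Python) =====
-- from typing import Any, Dict, List, Optional, Tuple
--
-- def _remove_section_commands(paragraphs: List[str]) -> List[str]:
--     """
--     Remove \\section commands from paragraph content while preserving the content.
--
--     Args:
--         paragraphs: List of paragraphs to process
--
--     Returns:
--         List of paragraphs with section commands removed
--     """
--     processed_paragraphs = []
--
--     for paragraph in paragraphs:
--         lines = paragraph.split("\n")
--
--         # Find and remove \section lines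
--         section_indices = [i for i, line in enumerate(lines) if "\\section" in line]
--
--         for idx in reversed(section_indices):
--             if idx + 1 < len(lines) and not lines[idx + 1].startswith("\\"):
--                 del lines[idx]
--
--         processed_paragraph = "\n".join(lines)
--         if processed_paragraph.strip():
--             processed_paragraphs.append(processed_paragraph)
--
--     return processed_paragraphs
-- ===== SOURCE B (Python) =====
-- from typing import List
--
--
-- def _remove_section_commands(paragraphs: List[str]) -> List[str]:
--     processed_paragraphs = []
--     for paragraph in paragraphs:
--         kept = []          # lines kept, collected back-to-front
--         nxt = None         # the next (later) line that survives, if any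
--         for line in reversed(paragraph.split("\n")):
--             if "\\section" in line and nxt is not None and not nxt.startswith("\\"):
--                 continue   # drop the section line
--             kept.append(line)
--             nxt = line
--         processed = "\n".join(reversed(kept))
--         if processed.strip():
--             processed_paragraphs.append(processed)
--     return processed_paragraphs
-- ===== Notes on version B (the rewrite author's own statement) =====
-- stated objective: alternative
-- what changed: Replaces the index-list + reversed in-place deletion pass with a single right-to-left scan that tracks the next surviving line, building the kept lines back-to-front with no index arithmetic.
import Mathlib
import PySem

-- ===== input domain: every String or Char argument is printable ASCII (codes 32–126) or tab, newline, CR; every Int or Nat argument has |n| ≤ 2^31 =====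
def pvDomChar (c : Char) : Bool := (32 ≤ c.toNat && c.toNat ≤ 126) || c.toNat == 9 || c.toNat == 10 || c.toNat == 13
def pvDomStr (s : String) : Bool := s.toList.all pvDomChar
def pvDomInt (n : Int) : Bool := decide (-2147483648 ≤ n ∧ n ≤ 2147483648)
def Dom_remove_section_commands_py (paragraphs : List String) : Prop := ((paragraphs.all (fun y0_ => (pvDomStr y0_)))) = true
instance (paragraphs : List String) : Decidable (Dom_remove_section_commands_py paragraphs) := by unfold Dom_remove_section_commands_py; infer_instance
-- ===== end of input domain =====

-- B replaces A's index-list + reversed in-place deletion pass by a single right-to-left scan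
-- tracking the next surviving line (objective: alternative decomposition, same cost).

-- ===== PORT A =====
-- [i for i, line in enumerate(lines) if "\\section" in line]
def pvSectionIndices (lines : List String) : List Int :=
  ((PySem.List.enumerate lines 0).filter (fun p => PySem.Str.isIn "\\section" p.2)).map (fun p => p.1)

-- body of 'for idx in reversed(section_indices): if idx+1 < len(lines) and not lines[idx+1].startswith("\\"): del lines[idx]'
def pvDelStep (ls : List String) (idx : Int) : List String :=
  if idx + 1 < (ls.length : Int) ∧ PySem.Str.startswith (PySem.List.pyGetD ls (idx + 1) "") "\\" = false then
    match PySem.List.pop? ls idx with   -- Python 'del lines[idx]'; idx is always in range when this branch runs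
    | some (_, ls') => ls'
    | none => ls
  else ls

-- "\\n" is a nonempty separator, so split? is always some and .getD [] is exact; one iteration of the paragraph loop:
def pvBodyA (acc : List String) (paragraph : String) : List String :=
  let lines := (PySem.Str.split? paragraph "\n").getD []
  let lines2 := (pvSectionIndices lines).reverse.foldl pvDelStep lines
  let processed := PySem.Str.join "\n" lines2
  if PySem.Str.strip processed ≠ "" then acc ++ [processed] else acc

def remove_section_commands_py (paragraphs : List String) : List String :=
  paragraphs.foldl pvBodyA []

-- ===== PORT B =====
-- body of the reverse scan: state = (kept lines back-to-front, next surviving line)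
def pvScanStep (st : List String × Option String) (line : String) : List String × Option String :=
  match st.2 with
  | some nxt =>
      if PySem.Str.isIn "\\section" line = true ∧ PySem.Str.startswith nxt "\\" = false then st
      else (st.1 ++ [line], some line)
  | none => (st.1 ++ [line], some line)

def pvBodyB (acc : List String) (paragraph : String) : List String :=
  let st := ((PySem.Str.split? paragraph "\n").getD []).reverse.foldl pvScanStep ([], none)
  let processed := PySem.Str.join "\n" st.1.reverse
  if PySem.Str.strip processed ≠ "" then acc ++ [processed] else acc

def remove_section_commands_py_alt (paragraphs : List String) : List String :=
  paragraphs.foldl pvBodyB []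

-- ===== PRECONDITION & SPEC =====
def Spec_remove_section_commands_py (paragraphs : List String) (out : List String) : Prop := out = remove_section_commands_py_alt paragraphs
instance (paragraphs : List String) (out : List String) : Decidable (Spec_remove_section_commands_py paragraphs out) := by unfold Spec_remove_section_commands_py; infer_instance

-- ===== CLAIM (what is proved, stated in full; the proofs are below) =====
def Claim_equal_remove_section_commands_py : Prop := ∀ (paragraphs : List String), Dom_remove_section_commands_py paragraphs → Spec_remove_section_commands_py paragraphs (remove_section_commands_py paragraphs)

-- ===== LEMMAS AND PROOFS =====

-- the common specification of both line-filtering passes: keep a line unless it contains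
-- "\section" and the next SURVIVING line exists and does not start with "\"
def pvKeep : List String → List String
  | [] => []
  | l :: rest =>
    match pvKeep rest with
    | [] => [l]
    | h :: t =>
        if PySem.Str.isIn "\\section" l = true ∧ PySem.Str.startswith h "\\" = false
        then h :: t else l :: h :: t

lemma pvScan_eq_keep (lines : List String) (acc0 : List String) :
    lines.reverse.foldl pvScanStep (acc0, none)
      = (acc0 ++ (pvKeep lines).reverse, (pvKeep lines).head?) := by
  induction lines generalizing acc0 with
  | nil => simp [pvKeep]
  | cons l rest ih =>
    rw [List.reverse_cons, List.foldl_append, ih]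
    cases h : pvKeep rest with
    | nil => simp [pvScanStep, pvKeep, h]
    | cons hd tl =>
      simp only [List.foldl_cons, List.foldl_nil, pvScanStep, pvKeep, h, List.head?_cons]
      split_ifs with hc
      · rfl
      · simp

lemma pvDelStep_succ (l : String) (ls : List String) (i : Int) (hi : 0 ≤ i) :
    pvDelStep (l :: ls) (i + 1) = l :: pvDelStep ls i := by
  obtain ⟨k, rfl⟩ := Int.eq_ofNat_of_zero_le hi
  have h1 : (k : Int) + 1 = ((k + 1 : Nat) : Int) := by push_cast; ring
  have h2 : (k : Int) + 1 + 1 = ((k + 2 : Nat) : Int) := by push_cast; ring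
  unfold pvDelStep
  rw [h2, h1, PySem.List.pyGetD_natCast, PySem.List.pyGetD_natCast]
  by_cases hk : k + 1 < ls.length
  · have hlt : ((k + 2 : Nat) : Int) < ((l :: ls).length : Int) := by
      simp [List.length_cons]; omega
    have hlt' : ((k + 1 : Nat) : Int) < (ls.length : Int) := by exact_mod_cast hk
    by_cases hs : PySem.Str.startswith (ls.getD (k + 1) "") "\\" = false
    · rw [if_pos ⟨hlt, by simpa using hs⟩, if_pos ⟨hlt', hs⟩]
      rw [PySem.List.pop?_natCast (l :: ls) (k + 1) (by simp; omega),
          PySem.List.pop?_natCast ls k (by omega)]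
      simp
    · rw [if_neg (by simpa using fun h => hs), if_neg (by exact fun h => hs h.2)]
  · rw [if_neg, if_neg]
    · exact fun h => hk (by exact_mod_cast (by simpa using h.1 : ((k+1:Nat):Int) < (ls.length : Int)))
    · intro h
      have := h.1
      simp [List.length_cons] at this
      omega

lemma pvFoldl_delStep_shift (idxs : List Int) (h : ∀ i ∈ idxs, 0 ≤ i) (l : String) (ls : List String) :
    (idxs.map (· + 1)).foldl pvDelStep (l :: ls) = l :: idxs.foldl pvDelStep ls := by
  induction idxs generalizing ls with
  | nil => rfl
  | cons i rest ih =>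
    simp only [List.map_cons, List.foldl_cons]
    rw [pvDelStep_succ l ls i (h i (by simp))]
    exact ih (fun j hj => h j (by simp [hj])) _

lemma pvSecShift (xs : List String) (s : Int) :
    ((PySem.List.enumerate xs s).filter (fun p => PySem.Str.isIn "\\section" p.2)).map (fun p => p.1)
    = (((PySem.List.enumerate xs 0).filter (fun p => PySem.Str.isIn "\\section" p.2)).map (fun p => p.1)).map (· + s) := by
  induction xs generalizing s with
  | nil => simp [PySem.List.enumerate_nil]
  | cons x xs ih =>
    rw [PySem.List.enumerate_cons, PySem.List.enumerate_cons]
    by_cases hc : PySem.Str.isIn "\\section" x = true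
    · simp only [List.filter_cons, hc, if_pos, List.map_cons]
      rw [ih (s + 1), ih (0 + 1)]
      simp only [List.map_map]
      refine congrArg₂ _ (by ring) ?_
      apply List.map_congr_left
      intro a _
      simp [Function.comp]
      ring
    · simp only [List.filter_cons, hc]
      simp only [Bool.false_eq_true, ite_false]
      rw [ih (s + 1), ih (0 + 1)]
      simp only [List.map_map]
      apply List.map_congr_left
      intro a _
      simp [Function.comp]
      ring

lemma pvSectionIndices_nonneg (lines : List String) : ∀ i ∈ pvSectionIndices lines, 0 ≤ i := by
  intro i hi
  unfold pvSectionIndices at hi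
  obtain ⟨p, hp, rfl⟩ := List.mem_map.mp hi
  have hpe := List.mem_of_mem_filter hp
  rw [PySem.List.mem_enumerate_iff] at hpe
  obtain ⟨k, hk, rfl⟩ := hpe
  simp

lemma pvSectionIndices_cons (l : String) (rest : List String) :
    pvSectionIndices (l :: rest)
    = (if PySem.Str.isIn "\\section" l = true then [(0 : Int)] else [])
      ++ (pvSectionIndices rest).map (· + 1) := by
  unfold pvSectionIndices
  rw [PySem.List.enumerate_cons]
  by_cases hc : PySem.Str.isIn "\\section" l = true
  · simp only [List.filter_cons, hc, if_pos, List.map_cons]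
    rw [pvSecShift rest (0 + 1)]
    norm_num
  · simp only [List.filter_cons, hc, Bool.false_eq_true, ite_false]
    rw [pvSecShift rest (0 + 1)]
    norm_num

lemma pvALoop_eq_keep (lines : List String) :
    (pvSectionIndices lines).reverse.foldl pvDelStep lines = pvKeep lines := by
  induction lines with
  | nil => rfl
  | cons l rest ih =>
    rw [pvSectionIndices_cons, List.reverse_append]
    have hshift : ((pvSectionIndices rest).map (· + 1)).reverse.foldl pvDelStep (l :: rest)
        = l :: pvKeep rest := by
      rw [← List.map_reverse,
          pvFoldl_delStep_shift _ (fun i hi => pvSectionIndices_nonneg rest i (List.mem_reverse.mp hi)) l rest,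
          ih]
    by_cases hc : PySem.Str.isIn "\\section" l = true
    · simp only [hc, if_pos, List.reverse_singleton, List.foldl_append, hshift, List.foldl_cons,
        List.foldl_nil]
      cases hk : pvKeep rest with
      | nil => simp [pvDelStep, pvKeep, hk]
      | cons hd tl =>
        by_cases hs : PySem.Str.startswith hd "\\" = false
        · have : pvDelStep (l :: hd :: tl) 0 = hd :: tl := by
            unfold pvDelStep
            rw [if_pos]
            · simp [PySem.List.pop?_zero_cons]
            · exact ⟨by push_cast [List.length_cons]; omega,
                by simpa [PySem.List.pyGetD, PySem.List.pyIdx?] using hs⟩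
          rw [this]
          simp only [pvKeep, hk]
          rw [if_pos ⟨hc, hs⟩]
        · have : pvDelStep (l :: hd :: tl) 0 = l :: hd :: tl := by
            unfold pvDelStep
            rw [if_neg]
            intro h
            exact hs (by simpa [PySem.List.pyGetD, PySem.List.pyIdx?] using h.2)
          rw [this]
          simp only [pvKeep, hk]
          rw [if_neg (fun hh => hs hh.2)]
    · simp only [hc, Bool.false_eq_true, ite_false, List.reverse_nil, List.foldl_append,
        hshift, List.foldl_nil]
      cases hk : pvKeep rest with
      | nil => simp [pvKeep, hk]
      | cons hd tl =>
        simp only [pvKeep, hk]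
        rw [if_neg (fun hh => hc hh.1)]

lemma pvBody_eq (acc : List String) (paragraph : String) :
    pvBodyA acc paragraph = pvBodyB acc paragraph := by
  unfold pvBodyA pvBodyB
  dsimp only
  rw [pvALoop_eq_keep, pvScan_eq_keep]
  simp

lemma pvFoldl_body_eq (ps : List String) : ∀ acc : List String,
    ps.foldl pvBodyA acc = ps.foldl pvBodyB acc := by
  induction ps with
  | nil => intro acc; rw [List.foldl_nil, List.foldl_nil]
  | cons p rest ih =>
    intro acc
    rw [List.foldl_cons, List.foldl_cons, pvBody_eq]
    exact ih _

theorem remove_section_commands_py_spec : Claim_equal_remove_section_commands_py := by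
  intro paragraphs _
  unfold Spec_remove_section_commands_py remove_section_commands_py remove_section_commands_py_alt
  exact pvFoldl_body_eq paragraphs []
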